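-- pv_equiv track=rewrite | github.com/MajidAkh/Project_Document_Similarity | Project-Code/main.py | createShingle
-- ===== SOURCE A (Python) =====
-- def createShingle(Liste,k):
--     ids = 0
--     m = []
--     shingle_id = {}
--     id_shingle = []
--
--
--     #Implementation of a dict the key is the doc id and value is the text.
--
--     #loop all the docs
--     for d in Liste:
--         #removing whitespace
--         d_new = ''.join(c for c in d if c.isalnum())
--         char_shing = [d_new[i:i+k] for i in range(len(d_new)-k+1)]
--         sid = set()
--         for sh in char_shing:
--             if sh not in shingle_id:
--                 shingle_id[sh] = ids
--                 id_shingle.append(sh)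
--                 ids = ids + 1
--             sid.add(shingle_id[sh])
--         m.append(sid)
--     return m, id_shingle
-- ===== SOURCE B (Python) =====
-- def createShingle(Liste, k):
--     # Stage 1: per-document k-shingle lists.
--     docs = []
--     for d in Liste:
--         d_new = ''.join(c for c in d if c.isalnum())
--         docs.append([d_new[i:i+k] for i in range(len(d_new) - k + 1)])
--     # Stage 2: the vocabulary is the ordered dedup of the flattened shingle stream;
--     # an id is simply a position in that list.
--     id_shingle = list(dict.fromkeys(sh for shs in docs for sh in shs))
--     idx = {sh: i for i, sh in enumerate(id_shingle)}
--     # Stage 3: each document's id-set.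
--     m = [{idx[sh] for sh in shs} for shs in docs]
--     return m, id_shingle
-- ===== Notes on version B (the rewrite author's own statement) =====
-- stated objective: alternative
-- what changed: B replaces A's interleaved counter-and-dict first-seen registration with a pipeline: compute all per-doc shingle lists, take the ordered dedup of the flattened shingle stream as the vocabulary (ids are positions in that list, via dict.fromkeys + enumerate, no running counter or conditional insert), then map each doc list through the position index.
import Mathlib
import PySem

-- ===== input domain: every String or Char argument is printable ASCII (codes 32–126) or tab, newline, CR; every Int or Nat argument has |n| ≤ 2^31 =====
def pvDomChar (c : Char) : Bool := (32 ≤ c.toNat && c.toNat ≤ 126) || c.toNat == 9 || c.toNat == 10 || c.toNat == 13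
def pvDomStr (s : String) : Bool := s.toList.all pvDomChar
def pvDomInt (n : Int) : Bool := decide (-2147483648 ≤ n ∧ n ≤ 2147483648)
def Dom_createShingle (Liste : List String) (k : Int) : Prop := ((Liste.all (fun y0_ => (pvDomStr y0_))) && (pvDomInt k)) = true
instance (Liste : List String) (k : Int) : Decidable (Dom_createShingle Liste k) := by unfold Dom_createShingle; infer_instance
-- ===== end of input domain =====

-- B replaces A's interleaved counter/dict registration with a flatten → ordered-dedup →
-- positional-index pipeline (objective: alternative decomposition, same cost; the two agree everywhere).

-- shared per-document shingle computation (both Pythons compute this identical list the same way: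
-- alnum-filter the text, then all k-slices):
def shinglesOf (d : String) (k : Int) : List (List Char) :=
  let dn := d.toList.filter PySem.Chars.isalnum
  (PySem.List.pyRange 0 ((dn.length : Int) - k + 1)).map (fun i => PySem.List.slice dn (some i) (some (i + k)))

-- ===== PORT A =====
-- A's inner loop body: state (ids, shingle_id, id_shingle, sid)
def stepA (t : Int × PySem.Dict (List Char) Int × List String × List Int) (sh : List Char) :
    Int × PySem.Dict (List Char) Int × List String × List Int :=
  let u := if t.2.1.contains sh then (t.1, t.2.1, t.2.2.1)
           else (t.1 + 1, t.2.1.insert sh t.1, t.2.2.1 ++ [String.ofList sh])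
  (u.1, u.2.1, u.2.2, PySem.Set.add t.2.2.2 (u.2.1.getD sh 0))

-- A's outer loop body: state (ids, m, shingle_id, id_shingle)
def outerA (k : Int) (st : Int × List (List Int) × PySem.Dict (List Char) Int × List String) (d : String) :
    Int × List (List Int) × PySem.Dict (List Char) Int × List String :=
  let r := (shinglesOf d k).foldl stepA (st.1, st.2.2.1, st.2.2.2, PySem.Set.empty)
  (r.1, st.2.1 ++ [r.2.2.2], r.2.1, r.2.2.1)

def createShingle (Liste : List String) (k : Int) : List (List Int) × List String :=
  let r := Liste.foldl (outerA k) (0, [], PySem.Dict.empty, [])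
  (r.2.1, r.2.2.2)

-- ===== PORT B =====
-- positional index of a vocabulary list: {sh: i for i, sh in enumerate(id_shingle)}
def idxOf (S : List (List Char)) : PySem.Dict (List Char) Int :=
  (PySem.List.enumerate S 0).foldl (fun d p => d.insert p.2 p.1) PySem.Dict.empty

def createShingle_alt (Liste : List String) (k : Int) : List (List Int) × List String :=
  -- stage 1: per-document shingle lists
  let docs := Liste.foldl (fun acc d => acc ++ [shinglesOf d k]) []
  -- stage 2: vocabulary = ordered dedup (dict.fromkeys) of the flattened stream; ids = positions
  let ded := PySem.List.dedup (docs.flatMap (fun shs => shs))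
  let idx := idxOf ded
  -- stage 3: each document's id-set
  (docs.map (fun shs => PySem.Set.ofList (shs.map (fun sh => idx.getD sh 0))), ded.map String.ofList)

-- ===== PRECONDITION & SPEC =====
def Spec_createShingle (Liste : List String) (k : Int) (out : List (List Int) × List String) : Prop := out = createShingle_alt Liste k
instance (Liste : List String) (k : Int) (out : List (List Int) × List String) : Decidable (Spec_createShingle Liste k out) := by unfold Spec_createShingle; infer_instance

-- ===== CLAIM =====
def Claim_equal_createShingle : Prop := ∀ (Liste : List String) (k : Int), Dom_createShingle Liste k → Spec_createShingle Liste k (createShingle Liste k)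

-- ===== LEMMAS AND PROOFS =====

-- A's registration step, extracted: if sh is new it gets id = current vocabulary length
def regB (t : PySem.Dict (List Char) Int × List String) (sh : List Char) :
    PySem.Dict (List Char) Int × List String :=
  if t.1.contains sh then t else (t.1.insert sh ((t.2.length : Int)), t.2 ++ [String.ofList sh])

-- the vocabulary after registering all shingles of all docs, starting from state t
def regAllDocs (k : Int) (t : PySem.Dict (List Char) Int × List String) (docs : List String) :
    PySem.Dict (List Char) Int × List String :=
  docs.foldl (fun t d => (shinglesOf d k).foldl regB t) t

lemma regB_mono (t : PySem.Dict (List Char) Int × List String) (sh key : List Char)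
    (h : t.1.contains key = true) :
    (regB t sh).1.contains key = true ∧ (regB t sh).1.getD key 0 = t.1.getD key 0 := by
  unfold regB
  split_ifs with hc
  · exact ⟨h, rfl⟩
  · have hne : key ≠ sh := by rintro rfl; rw [h] at hc; exact hc rfl
    refine ⟨?_, ?_⟩
    · simp [PySem.Dict.contains_insert, h]
    · simp [PySem.Dict.getD_insert, hne]

lemma regList_mono (shs : List (List Char)) :
    ∀ (t : PySem.Dict (List Char) Int × List String) (key : List Char),
    t.1.contains key = true →
    (shs.foldl regB t).1.contains key = true ∧ (shs.foldl regB t).1.getD key 0 = t.1.getD key 0 := by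
  induction shs with
  | nil => exact fun t key h => ⟨h, rfl⟩
  | cons sh shs ih =>
    intro t key h
    obtain ⟨h1, h2⟩ := regB_mono t sh key h
    obtain ⟨h3, h4⟩ := ih (regB t sh) key h1
    exact ⟨h3, by rw [List.foldl_cons, h4, h2]⟩

lemma regAll_mono (k : Int) (docs : List String) :
    ∀ (t : PySem.Dict (List Char) Int × List String) (key : List Char),
    t.1.contains key = true →
    (regAllDocs k t docs).1.contains key = true ∧ (regAllDocs k t docs).1.getD key 0 = t.1.getD key 0 := by
  induction docs with
  | nil => exact fun t key h => ⟨h, rfl⟩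
  | cons d docs ih =>
    intro t key h
    obtain ⟨h1, h2⟩ := regList_mono (shinglesOf d k) t key h
    obtain ⟨h3, h4⟩ := ih ((shinglesOf d k).foldl regB t) key h1
    exact ⟨h3, by unfold regAllDocs; rw [List.foldl_cons]; exact h4.trans h2⟩

-- A's inner loop, started with ids = len(id_shingle), is the registration fold plus the sid built
-- through ANY dict D that agrees with the fold's final dict on its keys.
lemma innerA_eq (shs : List (List Char)) :
    ∀ (dct : PySem.Dict (List Char) Int) (idsh : List String) (sid : List Int)
      (D : PySem.Dict (List Char) Int),
    (∀ key, (shs.foldl regB (dct, idsh)).1.contains key = true →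
        D.getD key 0 = (shs.foldl regB (dct, idsh)).1.getD key 0) →
    shs.foldl stepA (((idsh.length : Int)), dct, idsh, sid) =
      (((shs.foldl regB (dct, idsh)).2.length : Int), (shs.foldl regB (dct, idsh)).1,
       (shs.foldl regB (dct, idsh)).2,
       shs.foldl (fun s sh => PySem.Set.add s (D.getD sh 0)) sid) := by
  induction shs with
  | nil => intro dct idsh sid D _; rfl
  | cons sh shs ih =>
    intro dct idsh sid D hD
    by_cases hc : dct.contains sh = true
    · have hreg : regB (dct, idsh) sh = (dct, idsh) := by unfold regB; simp [hc]
      simp only [List.foldl_cons, hreg] at hD ⊢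
      have htail := regList_mono shs (dct, idsh) sh hc
      have hval : D.getD sh 0 = dct.getD sh 0 := (hD sh htail.1).trans htail.2
      have hstep : stepA (((idsh.length : Int)), dct, idsh, sid) sh
          = (((idsh.length : Int)), dct, idsh, PySem.Set.add sid (D.getD sh 0)) := by
        unfold stepA; simp [hc, hval]
      rw [hstep, ih dct idsh (PySem.Set.add sid (D.getD sh 0)) D hD]
    · have hreg : regB (dct, idsh) sh
          = (dct.insert sh ((idsh.length : Int)), idsh ++ [String.ofList sh]) := by
        unfold regB; simp [hc]
      simp only [List.foldl_cons, hreg] at hD ⊢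
      have hc1 : (dct.insert sh ((idsh.length : Int))).contains sh = true :=
        PySem.Dict.contains_insert_self dct sh _
      have htail := regList_mono shs (dct.insert sh ((idsh.length : Int)), idsh ++ [String.ofList sh]) sh hc1
      have hval : D.getD sh 0 = ((idsh.length : Int)) := by
        rw [hD sh htail.1, htail.2]
        exact PySem.Dict.getD_insert_self dct sh _ 0
      have hstep : stepA (((idsh.length : Int)), dct, idsh, sid) sh
          = ((((idsh ++ [String.ofList sh]).length : Int)), dct.insert sh ((idsh.length : Int)),
             idsh ++ [String.ofList sh], PySem.Set.add sid (D.getD sh 0)) := by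
        unfold stepA
        simp [hc, PySem.Dict.getD_insert_self, hval]
      rw [hstep, ih (dct.insert sh ((idsh.length : Int))) (idsh ++ [String.ofList sh])
          (PySem.Set.add sid (D.getD sh 0)) D hD]

-- A's whole outer loop, through any dict D extending the final vocabulary.
lemma outerAll_eq (k : Int) (docs : List String) :
    ∀ (dct : PySem.Dict (List Char) Int) (idsh : List String) (m : List (List Int))
      (D : PySem.Dict (List Char) Int),
    (∀ key, (regAllDocs k (dct, idsh) docs).1.contains key = true →
        D.getD key 0 = (regAllDocs k (dct, idsh) docs).1.getD key 0) →
    docs.foldl (outerA k) (((idsh.length : Int)), m, dct, idsh) =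
      (((regAllDocs k (dct, idsh) docs).2.length : Int),
       m ++ docs.map (fun d => PySem.Set.ofList ((shinglesOf d k).map (fun sh => D.getD sh 0))),
       (regAllDocs k (dct, idsh) docs).1, (regAllDocs k (dct, idsh) docs).2) := by
  induction docs with
  | nil => intro dct idsh m D _; simp [regAllDocs]
  | cons d docs ih =>
    intro dct idsh m D hD
    have hcons : regAllDocs k (dct, idsh) (d :: docs)
        = regAllDocs k ((shinglesOf d k).foldl regB (dct, idsh)) docs := by
      unfold regAllDocs; rw [List.foldl_cons]
    rw [hcons] at hD
    have hExtDoc : ∀ key, ((shinglesOf d k).foldl regB (dct, idsh)).1.contains key = true →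
        D.getD key 0 = ((shinglesOf d k).foldl regB (dct, idsh)).1.getD key 0 := by
      intro key h
      obtain ⟨h1, h2⟩ := regAll_mono k docs ((shinglesOf d k).foldl regB (dct, idsh)) key h
      exact (hD key h1).trans h2
    have hinner := innerA_eq (shinglesOf d k) dct idsh PySem.Set.empty D hExtDoc
    have hsid : (shinglesOf d k).foldl (fun s sh => PySem.Set.add s (D.getD sh 0)) PySem.Set.empty
        = PySem.Set.ofList ((shinglesOf d k).map (fun sh => D.getD sh 0)) := by
      rw [← PySem.Set.update_map_eq_foldl_add, ← PySem.Set.update_nil_left]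
      rfl
    have hout : outerA k (((idsh.length : Int)), m, dct, idsh) d
        = ((((shinglesOf d k).foldl regB (dct, idsh)).2.length : Int),
           m ++ [PySem.Set.ofList ((shinglesOf d k).map (fun sh => D.getD sh 0))],
           ((shinglesOf d k).foldl regB (dct, idsh)).1,
           ((shinglesOf d k).foldl regB (dct, idsh)).2) := by
      unfold outerA
      rw [show ((((idsh.length : Int)), m, dct, idsh).1,
            (((idsh.length : Int)), m, dct, idsh).2.2.1,
            (((idsh.length : Int)), m, dct, idsh).2.2.2, PySem.Set.empty)
          = (((idsh.length : Int)), dct, idsh, (PySem.Set.empty : List Int)) from rfl]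
      rw [hinner, hsid]
    rw [List.foldl_cons, hout,
      ih ((shinglesOf d k).foldl regB (dct, idsh)).1 ((shinglesOf d k).foldl regB (dct, idsh)).2
        (m ++ [PySem.Set.ofList ((shinglesOf d k).map (fun sh => D.getD sh 0))]) D
        (by simp only [Prod.mk.eta]; exact hD)]
    simp only [Prod.mk.eta]
    rw [hcons]
    simp [List.map_cons, List.append_assoc]

-- idxOf grows positionally
lemma idxOf_append_singleton (S : List (List Char)) (sh : List Char) :
    idxOf (S ++ [sh]) = (idxOf S).insert sh ((S.length : Int)) := by
  unfold idxOf
  rw [PySem.List.enumerate_append, List.foldl_append]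
  simp

lemma contains_idxOf (S : List (List Char)) (sh : List Char) :
    (idxOf S).contains sh = decide (sh ∈ S) := by
  unfold idxOf
  rw [PySem.Dict.contains_eq_decide_mem_keys,
    PySem.Dict.keys_foldl_insert_key (key := fun (p : Int × List Char) => p.2) (f := fun _ p => p.1)]
  simp [PySem.List.map_snd_enumerate, PySem.Set.update_nil_left, PySem.Set.mem_ofList]

-- the registration fold from a positional state is dedup + positional index
lemma regFold_eq (L : List (List Char)) :
    ∀ (S : List (List Char)), S.Nodup →
    L.foldl regB (idxOf S, S.map String.ofList)
      = (idxOf (PySem.Set.update S L), (PySem.Set.update S L).map String.ofList) := by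
  induction L with
  | nil => intro S _; simp [PySem.Set.update]
  | cons sh L ih =>
    intro S hS
    have hupd : PySem.Set.update S (sh :: L) = PySem.Set.update (PySem.Set.add S sh) L := by
      simp [PySem.Set.update]
    by_cases hm : sh ∈ S
    · have hadd : PySem.Set.add S sh = S := by simp [PySem.Set.add, PySem.Set.contains, hm]
      have hreg : regB (idxOf S, S.map String.ofList) sh = (idxOf S, S.map String.ofList) := by
        unfold regB; simp [contains_idxOf, hm]
      rw [List.foldl_cons, hreg, ih S hS, hupd, hadd]
    · have hadd : PySem.Set.add S sh = S ++ [sh] := by simp [PySem.Set.add, PySem.Set.contains, hm]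
      have hreg : regB (idxOf S, S.map String.ofList) sh
          = (idxOf (S ++ [sh]), (S ++ [sh]).map String.ofList) := by
        unfold regB
        simp [contains_idxOf, hm, idxOf_append_singleton]
      rw [List.foldl_cons, hreg, ih (S ++ [sh]) (by simp [List.nodup_append, hS]; intro a ha h; exact hm (h ▸ ha)), hupd, hadd]

-- a nested fold over docs is the fold over the flattened stream
lemma foldl_flatMap_eq {α β γ : Type} (g : α → List β) (f : γ → β → γ) (l : List α) :
    ∀ (i : γ), (l.flatMap g).foldl f i = l.foldl (fun a x => (g x).foldl f a) i := by
  induction l with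
  | nil => intro i; rfl
  | cons x xs ih => intro i; simp [List.foldl_append, ih]

-- A's whole registration, characterised: dedup of the flattened stream + its positional index
lemma regAll_char (k : Int) (docs : List String) :
    regAllDocs k (PySem.Dict.empty, []) docs
      = (idxOf (PySem.List.dedup (docs.flatMap (fun d => shinglesOf d k))),
         (PySem.List.dedup (docs.flatMap (fun d => shinglesOf d k))).map String.ofList) := by
  have h0 : (PySem.Dict.empty, ([] : List String))
      = (idxOf [], ([] : List (List Char)).map String.ofList) := rfl
  unfold regAllDocs
  rw [h0, ← foldl_flatMap_eq (fun d => shinglesOf d k) regB docs,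
    regFold_eq _ [] List.nodup_nil]
  have : PySem.Set.update ([] : List (List Char)) (docs.flatMap (fun d => shinglesOf d k))
      = PySem.List.dedup (docs.flatMap (fun d => shinglesOf d k)) := by
    rw [PySem.List.dedup_eq_ofList]; rfl
  rw [this]

-- B's stage-1 loop builds exactly the per-doc shingle lists
lemma docsB_eq (k : Int) (Liste : List String) :
    Liste.foldl (fun acc d => acc ++ [shinglesOf d k]) []
      = Liste.map (fun d => shinglesOf d k) := by
  rw [PySem.List.foldl_append_eq_flatMap (g := fun d => [shinglesOf d k])]
  simp only [List.nil_append]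
  exact List.map_eq_flatMap.symm

-- ===== VERDICT =====
theorem createShingle_spec : Claim_equal_createShingle := by
  unfold Claim_equal_createShingle
  intro Liste k _
  unfold Spec_createShingle createShingle createShingle_alt
  rw [docsB_eq]
  have hA := outerAll_eq k Liste PySem.Dict.empty [] []
    (regAllDocs k (PySem.Dict.empty, []) Liste).1 (fun key _ => rfl)
  rw [show ((0 : Int), ([] : List (List Int)), (PySem.Dict.empty : PySem.Dict (List Char) Int),
        ([] : List String))
      = ((((([] : List String).length : Int))), ([] : List (List Int)),
        (PySem.Dict.empty : PySem.Dict (List Char) Int), ([] : List String)) from by norm_num]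
  rw [hA, regAll_char]
  simp [List.map_map, Function.comp_def, List.flatMap_def]
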